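-- pv_equiv track=rewrite | github.com/Miroslav77777/aiagent | parser.py | pretty_section_name_from_id
-- ===== SOURCE A (Python) =====
-- CATEGORY_SUFFIXES = {
--     "about": "About",
--     "dean": "Dean",
--     "bach": "Bachelor programmes",
--     "mag": "Master programmes",
--     "depart": "Departments",
--     "science": "Science",
--     "inter": "International activity",
--     "contacts": "Contacts",
-- }
--
-- def pretty_section_name_from_id(tag_id: str) -> str:
--     """
--     Например:
--     mmf_about -> mmf / About
--     fit_bach -> fit / Bachelor programmes
--     """
--     for suffix, title in CATEGORY_SUFFIXES.items():
--         end = "_" + suffix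
--         if tag_id.endswith(end):
--             faculty_name = tag_id[:-len(end)]
--             faculty_name = faculty_name.strip("_- ")
--             return f"{faculty_name} — {title}" if faculty_name else title
--     return tag_id
-- ===== SOURCE B (Python) =====
-- CATEGORY_SUFFIXES = {
--     "about": "About",
--     "dean": "Dean",
--     "bach": "Bachelor programmes",
--     "mag": "Master programmes",
--     "depart": "Departments",
--     "science": "Science",
--     "inter": "International activity",
--     "contacts": "Contacts",
-- }
--
-- def pretty_section_name_from_id(tag_id: str) -> str:
--     parts = tag_id.rsplit('_', 1)
--     if len(parts) == 2 and parts[1] in CATEGORY_SUFFIXES: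
--         faculty = parts[0].strip("_- ")
--         title = CATEGORY_SUFFIXES[parts[1]]
--         return f"{faculty} — {title}" if faculty else title
--     return tag_id
-- ===== Notes on version B (the rewrite author's own statement) =====
-- stated objective: simpler
-- what changed: B splits the id once at its last underscore (rsplit) and does a single dictionary lookup on the final segment, instead of A's loop over all eight suffixes testing endswith on each.
import Mathlib
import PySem

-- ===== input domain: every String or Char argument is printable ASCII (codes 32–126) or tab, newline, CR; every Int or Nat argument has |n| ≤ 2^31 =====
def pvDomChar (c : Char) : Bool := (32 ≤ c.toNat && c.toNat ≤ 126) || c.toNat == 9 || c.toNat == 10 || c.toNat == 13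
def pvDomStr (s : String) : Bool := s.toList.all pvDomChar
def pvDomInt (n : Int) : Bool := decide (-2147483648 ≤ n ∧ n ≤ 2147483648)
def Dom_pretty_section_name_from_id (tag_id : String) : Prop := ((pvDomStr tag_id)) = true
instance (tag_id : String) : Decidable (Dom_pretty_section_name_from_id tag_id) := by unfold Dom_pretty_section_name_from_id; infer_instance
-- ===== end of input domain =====

-- B replaces A's loop of endswith tests by one rsplit at the last underscore plus a single dict lookup (simpler).

-- ===== PORT A =====
def pvCategorySuffixes : List (String × String) :=
  [("about", "About"), ("dean", "Dean"), ("bach", "Bachelor programmes"),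
   ("mag", "Master programmes"), ("depart", "Departments"), ("science", "Science"),
   ("inter", "International activity"), ("contacts", "Contacts")]

def pvPrettyLoopA (tag_id : String) : List (String × String) → String
  | [] => tag_id
  | (suffix, title) :: rest =>
    let e := "_" ++ suffix
    if PySem.Str.endswith tag_id e then
      let faculty := PySem.Str.stripChars (PySem.Str.slice tag_id none (some (-(PySem.Str.len e : Int)))) "_- "
      if faculty ≠ "" then faculty ++ " — " ++ title else title
    else pvPrettyLoopA tag_id rest

def pretty_section_name_from_id (tag_id : String) : String :=
  pvPrettyLoopA tag_id pvCategorySuffixes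

-- ===== PORT B =====
-- hand port of tag_id.rsplit('_', 1): splits at the LAST '_' (exact for a 1-char sep and maxsplit 1);
-- none when there is no '_'
def pvRsplitLast : List Char → Option (List Char × List Char)
  | [] => none
  | c :: rest =>
    match pvRsplitLast rest with
    | some (b, a) => some (c :: b, a)
    | none => if c = '_' then some ([], rest) else none

def pvCategoryDict : PySem.Dict String String := PySem.Dict.mk pvCategorySuffixes

def pretty_section_name_from_id_alt (tag_id : String) : String :=
  match pvRsplitLast tag_id.toList with
  | none => tag_id
  | some (b, a) =>
    match PySem.Dict.get? pvCategoryDict (String.ofList a) with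
    | none => tag_id
    | some title =>
      let faculty := PySem.Str.stripChars (String.ofList b) "_- "
      if faculty ≠ "" then faculty ++ " — " ++ title else title

-- ===== PRECONDITION & SPEC =====
def Spec_pretty_section_name_from_id (tag_id : String) (out : String) : Prop := out = pretty_section_name_from_id_alt tag_id
instance (tag_id : String) (out : String) : Decidable (Spec_pretty_section_name_from_id tag_id out) := by unfold Spec_pretty_section_name_from_id; infer_instance

-- ===== CLAIM (what is proved, stated in full; the proofs are below) =====
def Claim_equal_pretty_section_name_from_id : Prop := ∀ (tag_id : String), Dom_pretty_section_name_from_id tag_id → Spec_pretty_section_name_from_id tag_id (pretty_section_name_from_id tag_id)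

-- ===== LEMMAS AND PROOFS =====

theorem pvRsplit_ne_none : ∀ (cs : List Char), '_' ∈ cs → pvRsplitLast cs ≠ none := by
  intro cs
  induction cs with
  | nil => intro h; simp at h
  | cons c rest ih =>
    intro hm
    simp only [pvRsplitLast]
    cases hds : pvRsplitLast rest with
    | some q => simp
    | none =>
      rcases List.mem_cons.mp hm with hm | hm
      · simp [← hm]
      · exact absurd hds (ih hm)

theorem pvRsplit_sound : ∀ (cs b a : List Char), pvRsplitLast cs = some (b, a) → cs = b ++ '_' :: a ∧ '_' ∉ a := by
  intro cs
  induction cs with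
  | nil => intro b a h; simp [pvRsplitLast] at h
  | cons c rest ih =>
    intro b a h
    simp only [pvRsplitLast] at h
    cases hr : pvRsplitLast rest with
    | some p =>
      obtain ⟨b', a'⟩ := p
      rw [hr] at h
      simp at h
      obtain ⟨⟨hb, ha⟩, -⟩ := And.intro h trivial
      obtain ⟨hc, hna⟩ := ih b' a' hr
      subst hb ha
      exact ⟨by simp [hc], hna⟩
    | none =>
      rw [hr] at h
      by_cases hc : c = '_'
      · simp [hc] at h
        obtain ⟨hb, ha⟩ := h
        subst hb ha
        refine ⟨by simp [hc], ?_⟩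
        intro hm
        exact pvRsplit_ne_none rest hm hr
      · simp [hc] at h

theorem pvRsplit_none : ∀ (cs : List Char), pvRsplitLast cs = none → '_' ∉ cs := by
  intro cs h hm
  exact pvRsplit_ne_none cs hm h

theorem pvSuffix_eq (s a b : List Char) (hs : '_' ∉ s) (ha : '_' ∉ a) :
    ('_' :: s) <:+ (b ++ '_' :: a) ↔ s = a := by
  constructor
  · intro h
    have h2 : ('_' :: a) <:+ (b ++ '_' :: a) := List.suffix_append b _
    rcases List.suffix_or_suffix_of_suffix h h2 with h3 | h3
    · rcases List.suffix_cons_iff.mp h3 with h4 | h4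
      · injection h4
      · exact absurd (h4.subset (by simp)) ha
    · rcases List.suffix_cons_iff.mp h3 with h4 | h4
      · injection h4 with _ h5; exact h5.symm
      · exact absurd (h4.subset (by simp)) hs
  · intro h; subst h; exact List.suffix_append b _

theorem pvStr_eq_of_toList {s t : String} (h : s.toList = t.toList) : s = t := by
  have := congrArg String.ofList h
  simpa using this

theorem pvSliceFac (tag_id : String) (b a : List Char) (s : String)
    (h : tag_id.toList = b ++ '_' :: a) (hlen : s.toList.length = a.length) :
    PySem.Str.slice tag_id none (some (-(PySem.Str.len ("_" ++ s) : Int))) = String.ofList b := by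
  apply pvStr_eq_of_toList
  have hk : PySem.Str.len ("_" ++ s) = a.length + 1 := by
    simp [PySem.Str.len_eq, hlen]
  simp only [PySem.Str.toList_slice, hk, PySem.Chars.slice_eq_listSlice]
  have h2 : (-((a.length : Int) + 1)) = -(((a.length + 1 : Nat)) : Int) := by push_cast; ring
  rw [h2, PySem.List.slice_to_neg_natCast _ _ (by omega : 0 < a.length + 1)]
  rw [h]
  simp

theorem pvLoop_match (tag_id : String) (b a : List Char)
    (h : tag_id.toList = b ++ '_' :: a) (ha : '_' ∉ a) :
    ∀ pairs : List (String × String), (∀ p ∈ pairs, '_' ∉ p.1.toList) →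
    pvPrettyLoopA tag_id pairs =
      (match PySem.Dict.get? (PySem.Dict.mk pairs) (String.ofList a) with
       | none => tag_id
       | some title =>
         let faculty := PySem.Str.stripChars (String.ofList b) "_- "
         if faculty ≠ "" then faculty ++ " — " ++ title else title) := by
  intro pairs
  induction pairs with
  | nil => intro _; simp [pvPrettyLoopA, PySem.Dict.get?]
  | cons p rest ih =>
    intro hp
    obtain ⟨s, t⟩ := p
    have hs : '_' ∉ s.toList := hp (s, t) (by simp)
    have hsuf : PySem.Str.endswith tag_id ("_" ++ s) = true ↔ s.toList = a := by
      rw [PySem.Str.endswith_eq, PySem.Chars.endswith_iff]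
      simp only [String.toList_append]
      have h1 : ("_" : String).toList = ['_'] := rfl
      rw [h1, h]
      exact pvSuffix_eq s.toList a b hs ha
    by_cases heq : s.toList = a
    · have hkey : String.ofList a = s := by
        apply pvStr_eq_of_toList; simpa using heq.symm
      simp only [pvPrettyLoopA, hsuf.mpr heq, if_true]
      rw [pvSliceFac tag_id b a s h (by rw [heq])]
      rw [PySem.Dict.get?_mk_cons, hkey]
      simp
    · have hne : PySem.Str.endswith tag_id ("_" ++ s) = false := by
        rw [Bool.eq_false_iff]; intro hc; exact heq (hsuf.mp hc)
      have hkey : (s == String.ofList a) = false := by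
        rw [beq_eq_false_iff_ne]
        intro hc
        exact heq (by rw [hc]; simp)
      simp only [pvPrettyLoopA, hne]
      rw [ih (fun q hq => hp q (by simp [hq]))]
      rw [PySem.Dict.get?_mk_cons, hkey]
      rfl

theorem pvLoop_id (tag_id : String) (h : '_' ∉ tag_id.toList) :
    ∀ pairs : List (String × String), pvPrettyLoopA tag_id pairs = tag_id := by
  intro pairs
  induction pairs with
  | nil => rfl
  | cons p rest ih =>
    obtain ⟨s, t⟩ := p
    have hne : PySem.Str.endswith tag_id ("_" ++ s) = false := by
      rw [Bool.eq_false_iff]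
      intro hc
      rw [PySem.Str.endswith_eq, PySem.Chars.endswith_iff] at hc
      apply h
      apply hc.subset
      simp [String.toList_append]
    simp only [pvPrettyLoopA, hne]
    exact ih

-- ===== VERDICT (by name: the statement is the Claim_ definition above) =====
theorem pretty_section_name_from_id_spec : Claim_equal_pretty_section_name_from_id := by
  intro tag_id _
  unfold Spec_pretty_section_name_from_id pretty_section_name_from_id pretty_section_name_from_id_alt
  cases hr : pvRsplitLast tag_id.toList with
  | none => rw [pvLoop_id tag_id (pvRsplit_none _ hr)]
  | some p =>
    obtain ⟨b, a⟩ := p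
    obtain ⟨hc, hna⟩ := pvRsplit_sound _ b a hr
    rw [pvLoop_match tag_id b a hc hna pvCategorySuffixes (by decide)]
    rfl
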